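-- pv_equiv track=rewrite | github.com/zichunhao/boostedhh | data/index_private_nano.py | _get_sample_from_subsample
-- ===== SOURCE A (Python) =====
-- def _get_sample_from_subsample(subsample_name, is_data):
--     """
--     Determine the sample name from the subsample name using the SAMPLES dictionary.
--     Source:
--     - https://github.com/rkansal47/Run3_nano_submission/blob/40a74eeffd5d0b935629567dc291a32c9c43abb7/datasets/get_datasets.py
--     - https://github.com/rkansal47/Run3_nano_submission/blob/40a74eeffd5d0b935629567dc291a32c9c43abb7/datasets/get_mc.py
--     """
--     # If no match found, try to infer from common patterns
--     if is_data:
--         # Data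
--         if "JetHT" in subsample_name or "JetMET" in subsample_name:
--             return "JetMET"
--         elif "EGamma" in subsample_name:
--             return "EGamma"
--         elif "Muon" in subsample_name:
--             return "Muon"
--         elif "Tau" in subsample_name:
--             return "Tau"
--         elif "BTagMu" in subsample_name:
--             return "BTagMu"
--         elif "MuonEG" in subsample_name:
--             return "MuonEG"
--         elif "ParkingVBF" in subsample_name:
--             return "ParkingVBF"
--         elif "ParkingSingleMuon" in subsample_name:
--             return "ParkingSingleMuon"
--         else:
--             raise ValueError(f"Could not determine sample from subsample name: {subsample_name}. Please check the naming conventions.")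
--     else:
--         # MC
--         if "HHto4B" in subsample_name or "HHto2B2Tau" in subsample_name:
--             if "VBF" in subsample_name:
--                 return "HHbbtt" if "2B2Tau" in subsample_name else "HH4b"
--             else:
--                 return "HHbbtt" if "2B2Tau" in subsample_name else "HH4b"
--         elif "Hto2B" in subsample_name:
--             return "Hbb"
--         elif "Hto2C" in subsample_name:
--             return "Hcc"
--         elif "Hto2Tau" in subsample_name or "HTo2Tau" in subsample_name:
--             return "Htautau"
--         elif "QCD-4Jets_HT" in subsample_name:
--             return "QCD"
--         elif "QCD_PT" in subsample_name:
--             return "QCD_PT"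
--         elif "TTto" in subsample_name:
--             return "TT"
--         elif any(x in subsample_name for x in ["TbarWplus", "TWminus", "TbarBQ", "TBbarQ"]):
--             return "SingleTop"
--         elif "DYto2L-4Jets" in subsample_name:
--             return "DYJetsLO"
--         elif "DYto2L-2Jets" in subsample_name:
--             return "DYJetsNLO"
--         elif any(x in subsample_name for x in ["Wto2Q-3Jets", "WtoLNu-4Jets", "Zto2Q-4Jets"]):
--             return "VJetsLO"
--         elif any(x in subsample_name for x in ["Wto2Q-2Jets", "WtoLNu-2Jets", "Zto2Q-2Jets"]):
--             return "VJetsNLO"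
--         elif any(x in subsample_name for x in ["WW_", "WZ_", "ZZ_", "WWto4Q", "WWtoLNu2Q", "WZto3LNu", "WZto4Q", "ZZto2L2Q", "ZZto4L"]):
--             return "Diboson"
--         elif any(x in subsample_name for x in ["VBFZto2Q", "VBFWto2Q", "VBFto2L", "VBFto2Nu", "VBFtoLNu"]):
--             return "EWKV"
--         elif any(x in subsample_name for x in ["WGtoLNuG", "WGto2QG", "ZGto2NuG", "ZGto2QG"]):
--             return "VGamma"
--
--         raise ValueError(f"Could not determine sample from subsample name: {subsample_name}. Please check the naming conventions.")
-- ===== SOURCE B (Python) =====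
-- # B: one full pass collects the priorities of ALL matching patterns, then the smallest
-- # collected priority selects the result (instead of an early-exit if/elif cascade).
-- _DATA_PATTERNS = [
--     ("JetHT", 0), ("JetMET", 0), ("EGamma", 1), ("Muon", 2), ("Tau", 3),
--     ("BTagMu", 4), ("MuonEG", 5), ("ParkingVBF", 6), ("ParkingSingleMuon", 7),
-- ]
-- _DATA_RESULTS = ["JetMET", "EGamma", "Muon", "Tau", "BTagMu", "MuonEG",
--                  "ParkingVBF", "ParkingSingleMuon"]
-- _MC_PATTERNS = [
--     ("HHto4B", 0), ("HHto2B2Tau", 0), ("Hto2B", 1), ("Hto2C", 2),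
--     ("Hto2Tau", 3), ("HTo2Tau", 3), ("QCD-4Jets_HT", 4), ("QCD_PT", 5), ("TTto", 6),
--     ("TbarWplus", 7), ("TWminus", 7), ("TbarBQ", 7), ("TBbarQ", 7),
--     ("DYto2L-4Jets", 8), ("DYto2L-2Jets", 9),
--     ("Wto2Q-3Jets", 10), ("WtoLNu-4Jets", 10), ("Zto2Q-4Jets", 10),
--     ("Wto2Q-2Jets", 11), ("WtoLNu-2Jets", 11), ("Zto2Q-2Jets", 11),
--     ("WW_", 12), ("WZ_", 12), ("ZZ_", 12), ("WWto4Q", 12), ("WWtoLNu2Q", 12),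
--     ("WZto3LNu", 12), ("WZto4Q", 12), ("ZZto2L2Q", 12), ("ZZto4L", 12),
--     ("VBFZto2Q", 13), ("VBFWto2Q", 13), ("VBFto2L", 13), ("VBFto2Nu", 13), ("VBFtoLNu", 13),
--     ("WGtoLNuG", 14), ("WGto2QG", 14), ("ZGto2NuG", 14), ("ZGto2QG", 14),
-- ]
-- _MC_RESULTS = [None, "Hbb", "Hcc", "Htautau", "QCD", "QCD_PT", "TT", "SingleTop",
--                "DYJetsLO", "DYJetsNLO", "VJetsLO", "VJetsNLO", "Diboson", "EWKV", "VGamma"]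
--
--
-- def _get_sample_from_subsample(subsample_name, is_data):
--     patterns, results = (_DATA_PATTERNS, _DATA_RESULTS) if is_data else (_MC_PATTERNS, _MC_RESULTS)
--     hits = [prio for pat, prio in patterns if pat in subsample_name]
--     if not hits:
--         raise ValueError(
--             f"Could not determine sample from subsample name: {subsample_name}. Please check the naming conventions."
--         )
--     res = results[min(hits)]
--     if res is None:  # the HH entry: result depends on the name
--         return "HHbbtt" if "2B2Tau" in subsample_name else "HH4b"
--     return res
-- ===== Notes on version B (the rewrite author's own statement) =====
-- stated objective: alternative
-- what changed: Instead of an early-exit if/elif cascade, B does one full pass over a flat pattern->priority list collecting the priorities of ALL matching patterns, then selects the result by the minimum collected priority (correct because the cascade returns the lowest-priority matching group).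
import Mathlib
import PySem

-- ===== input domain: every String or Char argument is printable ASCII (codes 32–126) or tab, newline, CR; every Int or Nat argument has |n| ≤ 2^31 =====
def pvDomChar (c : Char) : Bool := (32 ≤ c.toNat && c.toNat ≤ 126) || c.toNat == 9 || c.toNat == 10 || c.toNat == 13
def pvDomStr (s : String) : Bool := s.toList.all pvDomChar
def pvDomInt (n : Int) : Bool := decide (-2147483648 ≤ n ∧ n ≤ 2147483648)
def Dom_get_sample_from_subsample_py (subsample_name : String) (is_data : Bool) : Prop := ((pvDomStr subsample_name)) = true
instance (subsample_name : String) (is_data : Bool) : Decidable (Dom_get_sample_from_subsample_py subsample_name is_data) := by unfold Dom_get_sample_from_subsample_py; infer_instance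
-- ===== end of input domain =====

-- B replaces the early-exit if/elif cascade by one full pass that collects the priorities
-- of all matching patterns and selects the result by the minimum priority (alternative,
-- same cost); inputs on which the Python raises ValueError are excluded by Pre_.

-- ===== PORT A =====
-- literal transliteration of the if/elif cascade; the two 'raise ValueError' lines
-- return "" here and are excluded by Pre_.
def get_sample_from_subsample_py (subsample_name : String) (is_data : Bool) : String :=
  if is_data then
    if PySem.Str.isIn "JetHT" subsample_name || PySem.Str.isIn "JetMET" subsample_name then "JetMET"
    else if PySem.Str.isIn "EGamma" subsample_name then "EGamma"
    else if PySem.Str.isIn "Muon" subsample_name then "Muon"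
    else if PySem.Str.isIn "Tau" subsample_name then "Tau"
    else if PySem.Str.isIn "BTagMu" subsample_name then "BTagMu"
    else if PySem.Str.isIn "MuonEG" subsample_name then "MuonEG"
    else if PySem.Str.isIn "ParkingVBF" subsample_name then "ParkingVBF"
    else if PySem.Str.isIn "ParkingSingleMuon" subsample_name then "ParkingSingleMuon"
    else ""  -- raise ValueError, excluded by Pre_
  else
    if PySem.Str.isIn "HHto4B" subsample_name || PySem.Str.isIn "HHto2B2Tau" subsample_name then
      if PySem.Str.isIn "VBF" subsample_name then
        (if PySem.Str.isIn "2B2Tau" subsample_name then "HHbbtt" else "HH4b")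
      else
        (if PySem.Str.isIn "2B2Tau" subsample_name then "HHbbtt" else "HH4b")
    else if PySem.Str.isIn "Hto2B" subsample_name then "Hbb"
    else if PySem.Str.isIn "Hto2C" subsample_name then "Hcc"
    else if PySem.Str.isIn "Hto2Tau" subsample_name || PySem.Str.isIn "HTo2Tau" subsample_name then "Htautau"
    else if PySem.Str.isIn "QCD-4Jets_HT" subsample_name then "QCD"
    else if PySem.Str.isIn "QCD_PT" subsample_name then "QCD_PT"
    else if PySem.Str.isIn "TTto" subsample_name then "TT"
    else if ["TbarWplus", "TWminus", "TbarBQ", "TBbarQ"].any (fun x => PySem.Str.isIn x subsample_name) then "SingleTop"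
    else if PySem.Str.isIn "DYto2L-4Jets" subsample_name then "DYJetsLO"
    else if PySem.Str.isIn "DYto2L-2Jets" subsample_name then "DYJetsNLO"
    else if ["Wto2Q-3Jets", "WtoLNu-4Jets", "Zto2Q-4Jets"].any (fun x => PySem.Str.isIn x subsample_name) then "VJetsLO"
    else if ["Wto2Q-2Jets", "WtoLNu-2Jets", "Zto2Q-2Jets"].any (fun x => PySem.Str.isIn x subsample_name) then "VJetsNLO"
    else if ["WW_", "WZ_", "ZZ_", "WWto4Q", "WWtoLNu2Q", "WZto3LNu", "WZto4Q", "ZZto2L2Q", "ZZto4L"].any (fun x => PySem.Str.isIn x subsample_name) then "Diboson"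
    else if ["VBFZto2Q", "VBFWto2Q", "VBFto2L", "VBFto2Nu", "VBFtoLNu"].any (fun x => PySem.Str.isIn x subsample_name) then "EWKV"
    else if ["WGtoLNuG", "WGto2QG", "ZGto2NuG", "ZGto2QG"].any (fun x => PySem.Str.isIn x subsample_name) then "VGamma"
    else ""  -- raise ValueError, excluded by Pre_

-- ===== PORT B =====
def pvPatsData : List (String × Int) :=
  [("JetHT", 0), ("JetMET", 0), ("EGamma", 1), ("Muon", 2), ("Tau", 3),
   ("BTagMu", 4), ("MuonEG", 5), ("ParkingVBF", 6), ("ParkingSingleMuon", 7)]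

def pvResData : List (Option String) :=
  [some "JetMET", some "EGamma", some "Muon", some "Tau", some "BTagMu", some "MuonEG",
   some "ParkingVBF", some "ParkingSingleMuon"]

def pvPatsMC : List (String × Int) :=
  [("HHto4B", 0), ("HHto2B2Tau", 0), ("Hto2B", 1), ("Hto2C", 2),
   ("Hto2Tau", 3), ("HTo2Tau", 3), ("QCD-4Jets_HT", 4), ("QCD_PT", 5), ("TTto", 6),
   ("TbarWplus", 7), ("TWminus", 7), ("TbarBQ", 7), ("TBbarQ", 7),
   ("DYto2L-4Jets", 8), ("DYto2L-2Jets", 9),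
   ("Wto2Q-3Jets", 10), ("WtoLNu-4Jets", 10), ("Zto2Q-4Jets", 10),
   ("Wto2Q-2Jets", 11), ("WtoLNu-2Jets", 11), ("Zto2Q-2Jets", 11),
   ("WW_", 12), ("WZ_", 12), ("ZZ_", 12), ("WWto4Q", 12), ("WWtoLNu2Q", 12),
   ("WZto3LNu", 12), ("WZto4Q", 12), ("ZZto2L2Q", 12), ("ZZto4L", 12),
   ("VBFZto2Q", 13), ("VBFWto2Q", 13), ("VBFto2L", 13), ("VBFto2Nu", 13), ("VBFtoLNu", 13),
   ("WGtoLNuG", 14), ("WGto2QG", 14), ("ZGto2NuG", 14), ("ZGto2QG", 14)]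

def pvResMC : List (Option String) :=
  [none, some "Hbb", some "Hcc", some "Htautau", some "QCD", some "QCD_PT", some "TT",
   some "SingleTop", some "DYJetsLO", some "DYJetsNLO", some "VJetsLO", some "VJetsNLO",
   some "Diboson", some "EWKV", some "VGamma"]

-- 'if not hits: raise' + 'res = results[min(hits)]' + the None check, on the min? result
def pvPick (subsample_name : String) (results : List (Option String)) : Option Int → String
  | none => ""  -- empty hits: raise ValueError, excluded by Pre_
  | some m =>
    match PySem.List.pyGet? results m with
    | some (some r) => r
    | some none => if PySem.Str.isIn "2B2Tau" subsample_name then "HHbbtt" else "HH4b"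
    | none => ""  -- unreachable: every priority indexes results

-- hits = [prio for pat, prio in patterns if pat in name]; min(hits); results[min] lookup.
def get_sample_from_subsample_py_alt (subsample_name : String) (is_data : Bool) : String :=
  let patterns := if is_data then pvPatsData else pvPatsMC
  let results := if is_data then pvResData else pvResMC
  let hits := (patterns.filter (fun pp => PySem.Str.isIn pp.1 subsample_name)).map Prod.snd
  pvPick subsample_name results (PySem.List.min? hits (fun x => x))

-- ===== PRECONDITION & SPEC =====
-- Pre_ excludes exactly the names matching no pattern of the selected table: there the
-- Python A raises ValueError (and B raises the same ValueError).
def Pre_get_sample_from_subsample_py (subsample_name : String) (is_data : Bool) : Prop :=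
  ((if is_data then pvPatsData else pvPatsMC).any
      (fun pp => PySem.Str.isIn pp.1 subsample_name)) = true
instance (subsample_name : String) (is_data : Bool) : Decidable (Pre_get_sample_from_subsample_py subsample_name is_data) := by unfold Pre_get_sample_from_subsample_py; infer_instance

def pvWitness_get_sample_from_subsample_py : String × Bool := ("GluGluHHto4B", false)

def Spec_get_sample_from_subsample_py (subsample_name : String) (is_data : Bool) (out : String) : Prop := out = get_sample_from_subsample_py_alt subsample_name is_data
instance (subsample_name : String) (is_data : Bool) (out : String) : Decidable (Spec_get_sample_from_subsample_py subsample_name is_data out) := by unfold Spec_get_sample_from_subsample_py; infer_instance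

-- ===== CLAIM =====
def Claim_equal_get_sample_from_subsample_py : Prop := ∀ (subsample_name : String) (is_data : Bool), Dom_get_sample_from_subsample_py subsample_name is_data → Pre_get_sample_from_subsample_py subsample_name is_data → Spec_get_sample_from_subsample_py subsample_name is_data (get_sample_from_subsample_py subsample_name is_data)

-- ===== LEMMAS AND PROOFS =====

-- the cascade index: first group (from offset k) with a matching pattern
def pvCasc (n : String) : Int → List (List String) → Option Int
  | _, [] => none
  | k, g :: gs => if g.any (fun p => PySem.Str.isIn p n) then some k else pvCasc n (k + 1) gs

-- flatten groups into (pattern, priority) pairs starting at offset k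
def pvFlat : Int → List (List String) → List (String × Int)
  | _, [] => []
  | k, g :: gs => g.map (fun p => (p, k)) ++ pvFlat (k + 1) gs

def pvGroupsData : List (List String) :=
  [["JetHT", "JetMET"], ["EGamma"], ["Muon"], ["Tau"], ["BTagMu"], ["MuonEG"],
   ["ParkingVBF"], ["ParkingSingleMuon"]]

def pvGroupsMC : List (List String) :=
  [["HHto4B", "HHto2B2Tau"], ["Hto2B"], ["Hto2C"], ["Hto2Tau", "HTo2Tau"],
   ["QCD-4Jets_HT"], ["QCD_PT"], ["TTto"], ["TbarWplus", "TWminus", "TbarBQ", "TBbarQ"],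
   ["DYto2L-4Jets"], ["DYto2L-2Jets"],
   ["Wto2Q-3Jets", "WtoLNu-4Jets", "Zto2Q-4Jets"],
   ["Wto2Q-2Jets", "WtoLNu-2Jets", "Zto2Q-2Jets"],
   ["WW_", "WZ_", "ZZ_", "WWto4Q", "WWtoLNu2Q", "WZto3LNu", "WZto4Q", "ZZto2L2Q", "ZZto4L"],
   ["VBFZto2Q", "VBFWto2Q", "VBFto2L", "VBFto2Nu", "VBFtoLNu"],
   ["WGtoLNuG", "WGto2QG", "ZGto2NuG", "ZGto2QG"]]

theorem pvFlat_snd_ge (k : Int) (gs : List (List String)) :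
    ∀ x ∈ pvFlat k gs, k ≤ x.2 := by
  induction gs generalizing k with
  | nil => intro x hx; simp [pvFlat] at hx
  | cons g gs ih =>
    intro x hx
    simp only [pvFlat, List.mem_append, List.mem_map] at hx
    rcases hx with ⟨p, _, rfl⟩ | hx
    · exact le_refl k
    · have := ih (k + 1) x hx; omega

theorem pvFoldl_min_const (l : List Int) (a : Int) (h : ∀ x ∈ l, a ≤ x) :
    l.foldl min a = a := by
  induction l with
  | nil => rfl
  | cons x t ih =>
    simp only [List.foldl_cons]
    have hax : a ≤ x := h x (by simp)
    rw [min_eq_left hax]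
    exact ih (fun y hy => h y (by simp [hy]))

theorem pvMin_key (n : String) (gs : List (List String)) (k : Int) :
    PySem.List.min? (((pvFlat k gs).filter (fun pp => PySem.Str.isIn pp.1 n)).map Prod.snd)
      (fun x => x) = pvCasc n k gs := by
  induction gs generalizing k with
  | nil => rfl
  | cons g gs ih =>
    simp only [pvFlat, pvCasc, List.filter_append, List.map_append]
    by_cases hg : g.any (fun p => PySem.Str.isIn p n) = true
    · simp only [hg, if_true]
      -- the prefix of the hits is a nonempty run of k's
      obtain ⟨p0, hp0mem, hp0⟩ := List.any_eq_true.mp hg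
      have hpref : ∃ t, ((g.map (fun p => (p, k))).filter
          (fun pp => PySem.Str.isIn pp.1 n)).map Prod.snd = k :: t ∧ ∀ x ∈ t, x = k := by
        clear hg
        induction g with
        | nil => simp at hp0mem
        | cons q g' ihg =>
          by_cases hq : PySem.Str.isIn q n = true
          · have hq' : PySem.Chars.isIn q.toList n.toList = true := hq
            refine ⟨((g'.map (fun p => (p, k))).filter
                (fun pp => PySem.Str.isIn pp.1 n)).map Prod.snd, ?_, ?_⟩
            · simp [hq']
            · intro x hx
              simp only [List.mem_map, List.mem_filter, List.mem_map] at hx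
              obtain ⟨pp, ⟨⟨p, _, rfl⟩, _⟩, rfl⟩ := hx
              rfl
          · rcases List.mem_cons.mp hp0mem with rfl | hmem
            · rw [hp0] at hq; exact absurd rfl hq
            · have hq' : PySem.Chars.isIn q.toList n.toList = false :=
                Bool.not_eq_true _ ▸ eq_false_of_ne_true hq
              obtain ⟨t, ht, hall⟩ := ihg hmem
              refine ⟨t, ?_, hall⟩
              simpa [List.filter_cons, hq'] using ht
      obtain ⟨t, ht, hall⟩ := hpref
      rw [ht]
      have htail : ∀ x ∈ t ++ ((pvFlat (k + 1) gs).filter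
          (fun pp => PySem.Str.isIn pp.1 n)).map Prod.snd, k ≤ x := by
        intro x hx
        rcases List.mem_append.mp hx with hx | hx
        · exact le_of_eq (hall x hx).symm
        · simp only [List.mem_map, List.mem_filter] at hx
          obtain ⟨pp, ⟨hpp, _⟩, rfl⟩ := hx
          have := pvFlat_snd_ge (k + 1) gs pp hpp; omega
      rw [List.cons_append, PySem.List.min?_id_cons]
      rw [pvFoldl_min_const _ _ htail]
    · simp only [hg]
      have hempty : (g.map (fun p => (p, k))).filter (fun pp => PySem.Str.isIn pp.1 n) = [] := by
        rw [List.filter_eq_nil_iff]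
        intro pp hpp
        simp only [List.mem_map] at hpp
        obtain ⟨p, hp, rfl⟩ := hpp
        simp only [Bool.not_eq_true]
        by_contra hc
        exact hg (List.any_eq_true.mpr ⟨p, hp, by simpa using hc⟩)
      rw [hempty]
      simpa using ih (k + 1)

theorem pvIteCongr {c : Prop} [Decidable c] {a b a' b' : String} (h1 : a = a') (h2 : b = b') :
    (if c then a else b) = (if c then a' else b') := by rw [h1, h2]

-- ===== VERDICT =====
set_option maxHeartbeats 2000000 in
theorem get_sample_from_subsample_py_spec : Claim_equal_get_sample_from_subsample_py := by
  intro n is_data _ _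
  unfold Spec_get_sample_from_subsample_py get_sample_from_subsample_py get_sample_from_subsample_py_alt
  cases is_data
  · have hk := pvMin_key n pvGroupsMC 0
    have hpats : pvPatsMC = pvFlat 0 pvGroupsMC := by rfl
    simp only [Bool.false_eq_true, if_false, hpats, hk]
    simp only [pvGroupsMC, pvCasc, List.any_cons, List.any_nil, Bool.or_false,
      apply_ite (pvPick n pvResMC)]
    repeat (first | rfl | exact ite_self _ | apply pvIteCongr)
  · have hk := pvMin_key n pvGroupsData 0
    have hpats : pvPatsData = pvFlat 0 pvGroupsData := by rfl
    simp only [if_true, hpats, hk]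
    simp only [pvGroupsData, pvCasc, List.any_cons, List.any_nil, Bool.or_false,
      apply_ite (pvPick n pvResData)]
    repeat (first | rfl | exact ite_self _ | apply pvIteCongr)
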